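-- pv_equiv track=rewrite | github.com/Ayfri/Python-TP3 | src/ex1.py | calculate_longest_nbr
-- ===== SOURCE A (Python) =====
-- def calculate_longest_nbr(n: int) -> (int, int):
-- 	"""
-- 	Calcule le nombre le plus long de la suite de Syracuse actuelle.
-- 	:param n: Le nombre de départ pour la suite de Syracuse.
-- 	:type n: int
-- 	:return: L'index et le nombre le plus long de la suite de Syracuse via n.
-- 	:rtype: (int, int)
-- 	"""
-- 	i: int = n
-- 	longest_nbr: int = 0
-- 	longest_nbr_index: int = 0
-- 	while i != 1:
-- 		if i % 2 == 0:
-- 			i //= 2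
-- 		else:
-- 			i = 3 * i + 1
-- 		if i > longest_nbr:
-- 			longest_nbr = i
-- 			longest_nbr_index = n
-- 		n += 1
--
-- 	return len(str(longest_nbr_index)), len(str(longest_nbr))
-- ===== SOURCE B (Python) =====
-- def calculate_longest_nbr(n: int) -> (int, int):
-- 	seq = []
-- 	i = n
-- 	while i != 1:
-- 		i = i // 2 if i % 2 == 0 else 3 * i + 1
-- 		seq.append(i)
-- 	if not seq:
-- 		return (1, 1)
-- 	m = max(seq)
-- 	idx = seq.index(m)
-- 	return (len(str(n + idx)), len(str(m)))
-- ===== Notes on version B (the rewrite author's own statement) =====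
-- stated objective: alternative
-- what changed: B builds the whole Collatz trajectory as a list and derives the answer with max() and list.index() (first occurrence), instead of A's running-maximum accumulators updated inside the loop; Pre_ excludes n <= 0, where A (and B) loop forever.
import Mathlib
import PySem

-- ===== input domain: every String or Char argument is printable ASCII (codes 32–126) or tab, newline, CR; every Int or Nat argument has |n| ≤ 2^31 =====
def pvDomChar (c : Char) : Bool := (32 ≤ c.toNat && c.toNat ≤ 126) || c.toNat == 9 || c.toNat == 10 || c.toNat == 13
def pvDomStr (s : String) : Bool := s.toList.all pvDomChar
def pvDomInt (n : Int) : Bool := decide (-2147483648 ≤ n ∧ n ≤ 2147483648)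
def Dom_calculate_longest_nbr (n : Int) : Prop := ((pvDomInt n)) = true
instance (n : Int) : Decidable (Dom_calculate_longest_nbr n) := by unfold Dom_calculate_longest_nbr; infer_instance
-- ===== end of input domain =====

-- B replaces A's running-maximum accumulators by building the whole Collatz trajectory as a
-- list and reading the answer off with max/first-index (objective: alternative decomposition).
-- Both loops are ported with a fuel bound that only makes them total; on every input admitted
-- by Pre_ (1 ≤ n, |n| ≤ 2^31) the Python loops stop far below it.

-- ===== PORT A =====
def pvFuel : Nat := 100000

def pvALoop (fuel : Nat) (i n longest_nbr longest_nbr_index : Int) : Int × Int :=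
  match fuel with
  | 0 => (longest_nbr, longest_nbr_index)
  | fuel + 1 =>
    if i = 1 then (longest_nbr, longest_nbr_index)
    else
      let i' := if PySem.Int.mod i 2 = 0 then PySem.Int.floordiv i 2 else 3 * i + 1
      if longest_nbr < i' then pvALoop fuel i' (n + 1) i' n
      else pvALoop fuel i' (n + 1) longest_nbr longest_nbr_index

def calculate_longest_nbr (n : Int) : Int × Int :=
  let r := pvALoop pvFuel n n 0 0
  (PySem.Str.len (PySem.Int.toStr r.2), PySem.Str.len (PySem.Int.toStr r.1))

-- ===== PORT B =====
def pvTraj (fuel : Nat) (i : Int) : List Int :=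
  match fuel with
  | 0 => []
  | fuel + 1 =>
    if i = 1 then []
    else
      let j := if PySem.Int.mod i 2 = 0 then PySem.Int.floordiv i 2 else 3 * i + 1
      j :: pvTraj fuel j

def calculate_longest_nbr_alt (n : Int) : Int × Int :=
  let seq := pvTraj pvFuel n
  match PySem.List.max? seq (fun x => x) with
  | none => (1, 1)
  | some m =>
    let idx : Int := ((PySem.List.index? seq m).getD 0 : Nat)
    (PySem.Str.len (PySem.Int.toStr (n + idx)), PySem.Str.len (PySem.Int.toStr m))

-- ===== PRECONDITION & SPEC =====
-- Pre_ excludes n ≤ 0, on which A's while loop never reaches 1 and Python loops forever.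
def Pre_calculate_longest_nbr (n : Int) : Prop := 1 ≤ n
instance (n : Int) : Decidable (Pre_calculate_longest_nbr n) := by unfold Pre_calculate_longest_nbr; infer_instance
def pvWitness_calculate_longest_nbr : Int := 7

def Spec_calculate_longest_nbr (n : Int) (out : Int × Int) : Prop := out = calculate_longest_nbr_alt n
instance (n : Int) (out : Int × Int) : Decidable (Spec_calculate_longest_nbr n out) := by unfold Spec_calculate_longest_nbr; infer_instance

-- ===== CLAIM (what is proved, stated in full; the proofs are below) =====
def Claim_equal_calculate_longest_nbr : Prop := ∀ (n : Int), Dom_calculate_longest_nbr n → Pre_calculate_longest_nbr n → Spec_calculate_longest_nbr n (calculate_longest_nbr n)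

-- ===== LEMMAS AND PROOFS =====

-- every trajectory element is ≥ 1 when the start is
lemma pvTraj_pos (fuel : Nat) : ∀ i : Int, 1 ≤ i → ∀ x ∈ pvTraj fuel i, 1 ≤ x := by
  induction fuel with
  | zero => intro i _ x hx; simp [pvTraj] at hx
  | succ f ih =>
    intro i hi x hx
    by_cases h1 : i = 1
    · simp [pvTraj, h1] at hx
    · have hi2 : 2 ≤ i := by omega
      set j : Int := if PySem.Int.mod i 2 = 0 then PySem.Int.floordiv i 2 else 3 * i + 1 with hj
      have hjpos : 1 ≤ j := by
        rw [hj]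
        split_ifs with hm
        · rw [PySem.Int.floordiv_eq_ediv_of_pos (by omega)]; omega
        · omega
      simp only [pvTraj, if_neg h1] at hx
      rcases List.mem_cons.mp hx with h | h
      · omega
      · exact ih j hjpos x h

-- the accumulator loop of A computes max / first index of the trajectory list of B
lemma pv_loop_eq (fuel : Nat) : ∀ (i n lng idx : Int),
    pvALoop fuel i n lng idx =
      ((pvTraj fuel i).foldl max lng,
       if lng < (pvTraj fuel i).foldl max lng
       then n + (((PySem.List.index? (pvTraj fuel i)
                    ((pvTraj fuel i).foldl max lng)).getD 0 : Nat) : Int)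
       else idx) := by
  induction fuel with
  | zero => intro i n lng idx; simp [pvALoop, pvTraj]
  | succ f ih =>
    intro i n lng idx
    by_cases h1 : i = 1
    · simp [pvALoop, pvTraj, h1]
    · simp only [pvALoop, pvTraj, if_neg h1]
      generalize (if PySem.Int.mod i 2 = 0 then PySem.Int.floordiv i 2 else 3 * i + 1) = j
      by_cases hlj : lng < j
      · rw [if_pos hlj, ih]
        have hM : (j :: pvTraj f j).foldl max lng = (pvTraj f j).foldl max j := by
          simp [max_eq_right (le_of_lt hlj)]
        rw [hM]
        have hjM : j ≤ (pvTraj f j).foldl max j := (PySem.List.le_foldl_max (pvTraj f j) j).1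
        rw [if_pos (lt_of_lt_of_le hlj hjM)]
        by_cases hje : j = (pvTraj f j).foldl max j
        · rw [if_neg (by omega), ← hje, PySem.List.index?_cons_self]
          simp
        · rw [if_pos (lt_of_le_of_ne hjM hje)]
          have hMt : (pvTraj f j).foldl max j ∈ pvTraj f j := by
            rcases PySem.List.foldl_max_mem (pvTraj f j) j with h | h
            · exact absurd h.symm hje
            · exact h
          obtain ⟨k, hk⟩ := Option.isSome_iff_exists.mp
            ((PySem.List.index?_isSome_iff (pvTraj f j) _).mpr hMt)
          rw [PySem.List.index?_cons_of_ne (pvTraj f j) hje, hk]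
          simp only [Option.map_some, Option.getD_some, Prod.mk.injEq, true_and]
          push_cast
          ring_nf
      · rw [if_neg hlj, ih]
        have hjle : j ≤ lng := by omega
        have hM : (j :: pvTraj f j).foldl max lng = (pvTraj f j).foldl max lng := by
          simp [max_eq_left hjle]
        rw [hM]
        by_cases hcond : lng < (pvTraj f j).foldl max lng
        · rw [if_pos hcond, if_pos hcond]
          have hje : j ≠ (pvTraj f j).foldl max lng := by omega
          have hMt : (pvTraj f j).foldl max lng ∈ pvTraj f j := by
            rcases PySem.List.foldl_max_mem (pvTraj f j) lng with h | h
            · omega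
            · exact h
          obtain ⟨k, hk⟩ := Option.isSome_iff_exists.mp
            ((PySem.List.index?_isSome_iff (pvTraj f j) _).mpr hMt)
          rw [PySem.List.index?_cons_of_ne (pvTraj f j) hje, hk]
          simp only [Option.map_some, Option.getD_some, Prod.mk.injEq, true_and]
          push_cast
          ring_nf
        · rw [if_neg hcond, if_neg hcond]

-- ===== VERDICT (by name: the statement is the Claim_ definition above) =====
theorem calculate_longest_nbr_spec : Claim_equal_calculate_longest_nbr := by
  intro n _ hn
  unfold Spec_calculate_longest_nbr calculate_longest_nbr calculate_longest_nbr_alt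
  dsimp only
  rw [pv_loop_eq]
  cases hseq : pvTraj pvFuel n with
  | nil =>
    simp [PySem.List.max?]
    decide
  | cons a t =>
    have ha : 1 ≤ a := pvTraj_pos pvFuel n hn a (by rw [hseq]; exact List.mem_cons_self)
    have hM : (a :: t).foldl max 0 = t.foldl max a := by
      simp [max_eq_right (by omega : (0:Int) ≤ a)]
    rw [PySem.List.max?_id_cons a t, hM]
    have hpos : (0:Int) < t.foldl max a :=
      lt_of_lt_of_le (by omega) (PySem.List.le_foldl_max t a).1
    rw [if_pos hpos]
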